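-- pv_equiv track=rewrite | github.com/AphroMad/RandomGame | MusicSplit/build.py | build_group_channels
-- ===== SOURCE A (Python) =====
-- def get_group_index(program, is_drum):
--     """Map GM program number (0-127) to group index 0-5.
--
--     Groups:
--       0  Drums+Perc        — is_drum, or program 47 (Timpani), 55 (Orchestra Hit)
--       1  Bass              — programs 32-39
--       2  Brass/Wind        — programs 56-71
--       3  Keys/Piano+Synth  — programs 0-23, 80-95  (also fallback for unmapped)
--       4  Guitar            — programs 24-31
--       5  Ensemble+Choir+Strings — programs 40-54 (excl. 47, 55 caught above)
--     """
--     if is_drum: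
--         return 0
--     if program in (47, 55):
--         return 0
--     if 32 <= program <= 39:
--         return 1
--     if 56 <= program <= 71:
--         return 2
--     if (0 <= program <= 23) or (80 <= program <= 95):
--         return 3
--     if 24 <= program <= 31:
--         return 4
--     if 40 <= program <= 54:
--         return 5
--     return 3  # Other -> Keys/Piano fallback
--
-- def build_group_channels(channel_programs, note_counts):
--     """Return (groups, non_empty).
--
--     groups:    dict group_index -> set of MIDI channels
--     non_empty: dict group_index -> bool (True if any channel in group has notes)
--     """
--     groups = {i: set() for i in range(6)}
--     for ch, prog in channel_programs.items():
--         is_drum = (ch == 9 or prog is None)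
--         effective_prog = prog if prog is not None else 0
--         group = get_group_index(effective_prog, is_drum)
--         groups[group].add(ch)
--
--     non_empty = {
--         g: sum(note_counts.get(ch, 0) for ch in channels) > 0
--         for g, channels in groups.items()
--     }
--     return groups, non_empty
-- ===== SOURCE B (Python) =====
-- _RANGES = ((47, 47, 0), (55, 55, 0), (32, 39, 1), (56, 71, 2),
--            (0, 23, 3), (80, 95, 3), (24, 31, 4), (40, 54, 5))
--
-- def _classify(ch, prog):
--     if ch == 9 or prog is None:
--         return 0
--     for lo, hi, g in _RANGES:
--         if lo <= prog <= hi: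
--             return g
--     return 3
--
-- def build_group_channels(channel_programs, note_counts):
--     """Group-major: for each of the six groups, filter out the channels that
--     classify into it and total their notes, instead of dispatching channel by
--     channel into pre-built group sets and re-scanning them afterwards."""
--     groups = {}
--     non_empty = {}
--     for g in range(6):
--         members = {ch for ch, prog in channel_programs.items() if _classify(ch, prog) == g}
--         groups[g] = members
--         non_empty[g] = sum(note_counts.get(ch, 0) for ch in members) > 0
--     return groups, non_empty
-- ===== Notes on version B (the rewrite author's own statement) =====
-- stated objective: alternative
-- what changed: B is group-major: it loops once over the six groups, filtering the channels that classify into each group and totalling their notes inline, instead of A's channel-major dispatch into pre-built group sets followed by a second comprehension over the groups; the classifier is a data-driven scan over a range table instead of A's if-chain.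
import Mathlib
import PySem

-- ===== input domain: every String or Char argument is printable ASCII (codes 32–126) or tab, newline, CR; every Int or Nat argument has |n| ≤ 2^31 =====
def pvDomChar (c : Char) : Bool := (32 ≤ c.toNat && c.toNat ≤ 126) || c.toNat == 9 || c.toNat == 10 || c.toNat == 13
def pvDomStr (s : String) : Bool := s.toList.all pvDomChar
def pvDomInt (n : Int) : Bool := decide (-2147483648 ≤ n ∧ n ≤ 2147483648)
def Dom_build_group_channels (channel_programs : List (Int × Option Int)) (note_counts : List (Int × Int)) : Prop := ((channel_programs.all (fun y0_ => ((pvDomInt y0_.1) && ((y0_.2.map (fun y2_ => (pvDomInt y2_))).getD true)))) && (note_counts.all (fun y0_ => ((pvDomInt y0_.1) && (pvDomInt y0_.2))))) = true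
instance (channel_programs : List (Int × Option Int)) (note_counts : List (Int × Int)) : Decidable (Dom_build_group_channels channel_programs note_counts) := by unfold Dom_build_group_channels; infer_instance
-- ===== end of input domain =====

-- B is group-major (one loop over the six groups, each filtering its channels and
-- totalling their notes inline) instead of A's channel-major dispatch plus second scan;
-- an alternative decomposition of the same cost.

-- ===== PORT A =====
def get_group_index (program : Int) (is_drum : Bool) : Int :=
  if is_drum then 0
  else if program = 47 ∨ program = 55 then 0
  else if 32 ≤ program ∧ program ≤ 39 then 1
  else if 56 ≤ program ∧ program ≤ 71 then 2
  else if (0 ≤ program ∧ program ≤ 23) ∨ (80 ≤ program ∧ program ≤ 95) then 3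
  else if 24 ≤ program ∧ program ≤ 31 then 4
  else if 40 ≤ program ∧ program ≤ 54 then 5
  else 3

def build_group_channels (channel_programs : List (Int × Option Int)) (note_counts : List (Int × Int)) : (List (Int × List Int)) × (List (Int × Bool)) :=
  let cp := PySem.Dict.ofList channel_programs
  let nc := PySem.Dict.ofList note_counts
  let groups0 : PySem.Dict Int (PySem.Set Int) :=
    (PySem.List.pyRange 0 6 1).foldl (fun d i => d.insert i PySem.Set.empty) PySem.Dict.empty
  -- for ch, prog in channel_programs.items(): … groups[group].add(ch)
  -- (group is always a present key 0..5, so 'modify' with default [] is exact)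
  let groups := cp.items.foldl (fun d p =>
      let is_drum := p.1 == 9 || p.2.isNone
      let effective_prog := p.2.getD 0
      let g := get_group_index effective_prog is_drum
      d.modify g [] (fun s => PySem.Set.add s p.1)) groups0
  -- non_empty = {g: sum(note_counts.get(ch, 0) for ch in channels) > 0 for g, channels in groups.items()}
  -- (sum over a Python set of ints: order-independent, ported as List.sum over the Set's elements)
  let non_empty : PySem.Dict Int Bool :=
    PySem.Dict.mk (groups.items.map (fun q => (q.1, decide (0 < (q.2.map (fun ch => nc.getD ch 0)).sum))))
  (groups.items, non_empty.items)

-- ===== PORT B =====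
def bgc_ranges : List (Int × Int × Int) :=
  [(47, 47, 0), (55, 55, 0), (32, 39, 1), (56, 71, 2), (0, 23, 3), (80, 95, 3), (24, 31, 4), (40, 54, 5)]

-- the 'for lo, hi, g in _RANGES: if lo <= prog <= hi: return g' loop of Source B
def bgc_scan : List (Int × Int × Int) → Int → Int
  | [], _ => 3
  | (lo, hi, g) :: rest, p => if lo ≤ p ∧ p ≤ hi then g else bgc_scan rest p

def bgc_classify (p : Int × Option Int) : Int :=
  if p.1 == 9 || p.2.isNone then 0 else bgc_scan bgc_ranges (p.2.getD 0)

def build_group_channels_alt (channel_programs : List (Int × Option Int)) (note_counts : List (Int × Int)) : (List (Int × List Int)) × (List (Int × Bool)) :=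
  let cp := PySem.Dict.ofList channel_programs
  let nc := PySem.Dict.ofList note_counts
  let st := (PySem.List.pyRange 0 6 1).foldl (fun st g =>
      -- members = {ch for ch, prog in channel_programs.items() if _classify(ch, prog) == g}
      let members : PySem.Set Int :=
        PySem.Set.ofList ((cp.items.filter (fun p => bgc_classify p == g)).map Prod.fst)
      (st.1.insert g members,
       st.2.insert g (decide (0 < (members.map (fun ch => nc.getD ch 0)).sum))))
    ((PySem.Dict.empty : PySem.Dict Int (PySem.Set Int)), (PySem.Dict.empty : PySem.Dict Int Bool))
  (st.1.items, st.2.items)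

-- ===== PRECONDITION & SPEC =====
def Spec_build_group_channels (channel_programs : List (Int × Option Int)) (note_counts : List (Int × Int)) (out : (List (Int × List Int)) × (List (Int × Bool))) : Prop := out = build_group_channels_alt channel_programs note_counts
instance (channel_programs : List (Int × Option Int)) (note_counts : List (Int × Int)) (out : (List (Int × List Int)) × (List (Int × Bool))) : Decidable (Spec_build_group_channels channel_programs note_counts out) := by unfold Spec_build_group_channels; infer_instance

-- ===== CLAIM (what is proved, stated in full; the proofs are below) =====
def Claim_equal_build_group_channels : Prop := ∀ (channel_programs : List (Int × Option Int)) (note_counts : List (Int × Int)), Dom_build_group_channels channel_programs note_counts → Spec_build_group_channels channel_programs note_counts (build_group_channels channel_programs note_counts)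

-- ===== LEMMAS AND PROOFS =====

-- A's classifier applied to one (channel, program) item
def bgcA_group (p : Int × Option Int) : Int :=
  get_group_index (p.2.getD 0) (p.1 == 9 || p.2.isNone)

-- B's table scan agrees with A's if-chain on every item
theorem bgc_classify_eq (p : Int × Option Int) : bgc_classify p = bgcA_group p := by
  unfold bgc_classify bgcA_group
  by_cases hd : (p.1 == 9 || p.2.isNone) = true
  · simp [hd, get_group_index]
  · rw [if_neg hd, Bool.not_eq_true] at *
    rw [hd]
    simp only [bgc_ranges, bgc_scan, get_group_index, Bool.false_eq_true, if_false]
    split_ifs <;> omega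

-- A's classifier always lands in 0..5
theorem bgcA_group_mem (p : Int × Option Int) : bgcA_group p ∈ ([0, 1, 2, 3, 4, 5] : List Int) := by
  unfold bgcA_group get_group_index
  split_ifs <;> simp

-- a Set.update by elements already present changes nothing
theorem set_update_subset (l s : List Int) (h : ∀ x ∈ l, x ∈ s) : PySem.Set.update s l = s := by
  induction l generalizing s with
  | nil => rfl
  | cons x l ih =>
    have hx : PySem.Set.add s x = s := by
      have hm : x ∈ s := h x (by simp)
      simp [PySem.Set.add, PySem.Set.contains, hm]
    simp only [PySem.Set.update, List.foldl_cons]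
    rw [show List.foldl PySem.Set.add (PySem.Set.add s x) l = PySem.Set.update (PySem.Set.add s x) l from rfl,
        hx]
    exact ih s (fun y hy => h y (by simp [hy]))

-- the value of A's grouping fold at any key is the fold over the matching sublist
theorem bgc_fold_modify_getD (l : List (Int × Option Int)) (d : PySem.Dict Int (PySem.Set Int)) (k : Int) :
    ((l.foldl (fun d p => d.modify (bgcA_group p) [] (fun s => PySem.Set.add s p.1)) d).getD k [])
      = (l.filter (fun p => bgcA_group p == k)).foldl (fun s p => PySem.Set.add s p.1) (d.getD k []) := by
  induction l generalizing d with
  | nil => rfl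
  | cons p l ih =>
    simp only [List.foldl_cons, List.filter_cons]
    by_cases hk : bgcA_group p = k
    · rw [ih, PySem.Dict.getD_modify, if_pos hk.symm, if_pos (by simp [hk]), List.foldl_cons, hk]
    · rw [ih, PySem.Dict.getD_modify, if_neg (fun h => hk h.symm), if_neg (by simp [hk])]

-- the initial six-key dict: every value is the empty set
theorem bgc_initG_getD (k : Int) :
    ((PySem.List.pyRange 0 6 1).foldl (fun d i => d.insert i PySem.Set.empty)
      (PySem.Dict.empty : PySem.Dict Int (PySem.Set Int))).getD k [] = [] := by
  have h : PySem.List.pyRange 0 6 1 = [0, 1, 2, 3, 4, 5] := by decide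
  rw [h]
  simp only [List.foldl]
  simp [PySem.Dict.getD_insert, PySem.Dict.getD_empty, PySem.Set.empty]

-- A's groups dict, as an items list: the six groups in order, each holding its filtered channels
theorem bgc_A_items (cp : PySem.Dict Int (Option Int)) :
    (cp.items.foldl (fun d p => d.modify (bgcA_group p) [] (fun s => PySem.Set.add s p.1))
      ((PySem.List.pyRange 0 6 1).foldl (fun d i => d.insert i PySem.Set.empty) PySem.Dict.empty)).items
    = ([0, 1, 2, 3, 4, 5] : List Int).map (fun g =>
        (g, PySem.Set.ofList ((cp.items.filter (fun p => bgcA_group p == g)).map Prod.fst))) := by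
  set d0 : PySem.Dict Int (PySem.Set Int) :=
    (PySem.List.pyRange 0 6 1).foldl (fun d i => d.insert i PySem.Set.empty) PySem.Dict.empty with hd0
  have hk0 : d0.keys = [0, 1, 2, 3, 4, 5] := by rw [hd0]; decide
  have hnd : (cp.items.foldl (fun d p => d.modify (bgcA_group p) [] (fun s => PySem.Set.add s p.1)) d0).keys.Nodup := by
    have := PySem.Dict.nodup_keys_foldl_modify_key cp.items bgcA_group ([] : PySem.Set Int)
      (fun _ p s => PySem.Set.add s p.1) d0 (by rw [hk0]; decide)
    exact this
  have hkeys : (cp.items.foldl (fun d p => d.modify (bgcA_group p) [] (fun s => PySem.Set.add s p.1)) d0).keys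
      = [0, 1, 2, 3, 4, 5] := by
    have := PySem.Dict.keys_foldl_modify_key cp.items bgcA_group ([] : PySem.Set Int)
      (fun _ p s => PySem.Set.add s p.1) d0
    beta_reduce at this
    rw [this, hk0]
    exact set_update_subset _ _ (by
      intro x hx
      rcases List.mem_map.1 hx with ⟨p, _, hp⟩
      rw [← hp]; exact bgcA_group_mem p)
  rw [PySem.Dict.items_eq_map_keys _ hnd ([] : PySem.Set Int), hkeys]
  apply List.map_congr_left
  intro g _
  rw [bgc_fold_modify_getD, hd0, bgc_initG_getD]
  -- fold of Set.add over the filtered pairs = set(map fst filtered)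
  rw [PySem.Set.ofList_eq_foldl, List.foldl_map]

-- B's fold over range(6): the two inserted dicts list their six entries in order
theorem bgc_B_items (f : Int → PySem.Set Int) (b : Int → Bool) :
    (([0, 1, 2, 3, 4, 5] : List Int).foldl (fun st g => (st.1.insert g (f g), st.2.insert g (b g)))
        ((PySem.Dict.empty : PySem.Dict Int (PySem.Set Int)), (PySem.Dict.empty : PySem.Dict Int Bool)))
    = (PySem.Dict.mk (([0, 1, 2, 3, 4, 5] : List Int).map (fun g => (g, f g))),
       PySem.Dict.mk (([0, 1, 2, 3, 4, 5] : List Int).map (fun g => (g, b g)))) := by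
  simp only [List.foldl, List.map]
  rfl

-- ===== VERDICT (by name: the statement is the Claim_ definition above) =====
theorem build_group_channels_spec : Claim_equal_build_group_channels := by
  intro cps ncs _
  unfold Spec_build_group_channels
  simp only [build_group_channels, build_group_channels_alt]
  have hr : PySem.List.pyRange 0 6 1 = [0, 1, 2, 3, 4, 5] := by decide
  rw [hr]
  have hB := bgc_B_items
      (fun g => PySem.Set.ofList (((PySem.Dict.ofList cps).items.filter (fun p => bgc_classify p == g)).map Prod.fst))
      (fun g => decide (0 < ((PySem.Set.ofList (((PySem.Dict.ofList cps).items.filter (fun p => bgc_classify p == g)).map Prod.fst)).map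
          (fun ch => (PySem.Dict.ofList ncs).getD ch 0)).sum))
  rw [hB]
  have hA := bgc_A_items (PySem.Dict.ofList cps)
  rw [hr] at hA
  simp only [bgcA_group] at hA
  have hcl : ∀ g, ((PySem.Dict.ofList cps).items.filter (fun p => bgc_classify p == g))
      = ((PySem.Dict.ofList cps).items.filter
          (fun p => get_group_index (p.2.getD 0) (p.1 == 9 || p.2.isNone) == g)) := by
    intro g
    apply List.filter_congr
    intro p _
    rw [bgc_classify_eq p]
    rfl
  simp only [hcl]
  rw [hA]
  simp
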